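-- pv_equiv track=rewrite | github.com/beenorgone-notebook/python-notebook | py-practice/py-practice-hackerrank/Algorithms/Implementation/decent_num.py | max_decent_number
-- ===== SOURCE A (Python) =====
-- def max_decent_number(N):
--     if not (1 <= N <= 100000):
--         raise ValueError('N should be between 1 and 100000')
--     for i in range(0, N, 5):
--         if not (N - i) % 3:
--             max_decent_num = int('5' * (N-i) + '3' * i)
--             return max_decent_num
--     if N % 5:
--         return -1
--     else:
--         return int('3' * N)
-- ===== SOURCE B (Python) =====
-- def max_decent_number(N):
--     if not (1 <= N <= 100000):
--         raise ValueError('N should be between 1 and 100000')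
--     # number of threes must be a multiple of 5 congruent to N mod 3;
--     # the smallest such value (= maximal number of fives) is determined by N % 3
--     t = (0, 10, 5)[N % 3]
--     if t > N:
--         return -1
--     return int('5' * (N - t) + '3' * t)
-- ===== Notes on version B (the rewrite author's own statement) =====
-- stated objective: simpler
-- what changed: Replaces the scan over range(0, N, 5) (and the separate N % 5 fallback) by a closed form: the number of threes is (0, 10, 5)[N % 3] via modular arithmetic, returning -1 when it exceeds N.
import Mathlib
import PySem

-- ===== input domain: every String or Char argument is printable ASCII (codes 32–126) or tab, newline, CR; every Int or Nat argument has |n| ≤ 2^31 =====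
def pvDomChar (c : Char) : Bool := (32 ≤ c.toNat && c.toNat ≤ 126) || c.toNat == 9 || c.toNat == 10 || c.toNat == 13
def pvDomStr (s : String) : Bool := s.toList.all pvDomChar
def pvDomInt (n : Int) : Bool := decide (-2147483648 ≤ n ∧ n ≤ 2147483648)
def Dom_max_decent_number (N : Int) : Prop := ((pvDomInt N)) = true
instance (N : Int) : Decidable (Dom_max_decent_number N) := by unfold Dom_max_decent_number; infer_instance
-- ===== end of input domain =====

-- B replaces A's scan over range(0, N, 5) by a closed-form count of threes from N % 3 (objective: simpler).


-- ===== PORT A =====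
-- for i in range(0, N, 5): if not (N - i) % 3: return int('5'*(N-i) + '3'*i)
-- The first-match-and-return loop is List.find? over the same range; int(digits) is
-- PySem.Int.ofChars? (always some here: a nonempty digit string), '5'*k is pyRepeat.
def max_decent_number (N : Int) : Int :=
  match (PySem.List.pyRange 0 N 5).find? (fun i => PySem.Int.mod (N - i) 3 == 0) with
  | some i =>
      (PySem.Int.ofChars?
        (PySem.List.pyRepeat ['5'] (N - i) ++ PySem.List.pyRepeat ['3'] i)).getD 0
  | none =>
      if PySem.Int.mod N 5 != 0 then -1
      else (PySem.Int.ofChars? (PySem.List.pyRepeat ['3'] N)).getD 0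

-- ===== PORT B =====
-- t = (0, 10, 5)[N % 3]; if t > N: return -1; return int('5'*(N-t) + '3'*t)
def max_decent_number_alt (N : Int) : Int :=
  let t := PySem.List.pyGetD [0, 10, 5] (PySem.Int.mod N 3) 0
  if t > N then -1
  else
    (PySem.Int.ofChars?
      (PySem.List.pyRepeat ['5'] (N - t) ++ PySem.List.pyRepeat ['3'] t)).getD 0

-- ===== PRECONDITION & SPEC =====
-- A raises ValueError outside 1 <= N <= 100000; exactly those inputs are excluded.
def Pre_max_decent_number (N : Int) : Prop := 1 ≤ N ∧ N ≤ 100000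
instance (N : Int) : Decidable (Pre_max_decent_number N) := by unfold Pre_max_decent_number; infer_instance
def pvWitness_max_decent_number : Int := 11

def Spec_max_decent_number (N : Int) (out : Int) : Prop := out = max_decent_number_alt N
instance (N : Int) (out : Int) : Decidable (Spec_max_decent_number N out) := by unfold Spec_max_decent_number; infer_instance

-- ===== CLAIM (what is proved, stated in full; the proofs are below) =====
def Claim_equal_max_decent_number : Prop := ∀ (N : Int), Dom_max_decent_number N → Pre_max_decent_number N → Spec_max_decent_number N (max_decent_number N)

-- ===== LEMMAS AND PROOFS =====

-- range(0, N, 5) starts 0, 5, 10 once N ≥ 11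
theorem pyRange5_peel (N : Int) (h : 11 ≤ N) :
    ∃ rest, PySem.List.pyRange 0 N 5 = 0 :: 5 :: 10 :: rest := by
  rw [PySem.List.pyRange_of_pos 0 N (by norm_num : (0:Int) < 5)]
  have hlt : (0:Int) < N := by omega
  simp only [if_pos hlt]
  have hc : ∃ c : Nat, ((N - 0 + 5 - 1) / 5).toNat = c + 3 := by
    have h1 : (3:Int) ≤ (N - 0 + 5 - 1) / 5 := by omega
    exact ⟨((N - 0 + 5 - 1) / 5).toNat - 3, by omega⟩
  obtain ⟨c, hc⟩ := hc
  rw [hc]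
  refine ⟨(List.range' 3 c).map (fun k => 0 + 5 * (k : Int)), ?_⟩
  rw [List.range_eq_range']
  simp [List.range'_succ]
  induction List.range' 3 c with
  | nil => rfl
  | cons a l ih => simp_all

theorem equal_big (N : Int) (h : 11 ≤ N) :
    max_decent_number N = max_decent_number_alt N := by
  obtain ⟨rest, hr⟩ := pyRange5_peel N h
  have h3 : N % 3 = 0 ∨ N % 3 = 1 ∨ N % 3 = 2 := by omega
  unfold max_decent_number max_decent_number_alt
  rw [hr]
  rcases h3 with h3 | h3 | h3 <;>
    simp [List.find?, PySem.List.pyGetD, h3,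
          show (N - 5) % 3 = (N % 3 - 2) % 3 by omega,
          show (N - 10) % 3 = (N % 3 - 1) % 3 by omega] <;>
    (intro hx; exact absurd hx (by omega))

-- ===== VERDICT (by name: the statement is the Claim_ definition above) =====
theorem max_decent_number_spec : Claim_equal_max_decent_number := by
  intro N _ hpre
  unfold Spec_max_decent_number
  by_cases hbig : 11 ≤ N
  · exact equal_big N hbig
  · obtain ⟨h1, _⟩ := hpre
    interval_cases N <;> decide
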